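-- pv_equiv track=rewrite | github.com/lna-lab/lna-es | material_systems/40.Real/create_graph_real.py | generate_emotion_statements
-- ===== SOURCE A (Python) =====
-- from typing import List, Tuple, Dict, Optional, Union
--
-- def generate_emotion_statements(
--     sentences: List[str],
--     emotions: Dict[str, str],
--     char_var_map: Dict[str, str],
-- ) -> Tuple[List[str], List[str]]:
--     """
--     Generate Cypher statements for Emotion nodes and their relationships.
--
--     For each unique emotion keyword in the mapping, an `Emotion` node is
--     created with properties `word` (the keyword) and `category` (the mapped
--     category name).  When an emotion keyword appears in a sentence, a
--     `HAS_EMOTION` relationship is created from the sentence node to the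
--     emotion node.  Additionally, for each character appearing in the same
--     sentence (based on `char_var_map`), a `FEELS` relationship is created
--     from the character node to the emotion node.
--     """
--     emotion_nodes: List[str] = []
--     rels: List[str] = []
--     # Map emotion keyword to variable alias
--     emotion_alias_map: Dict[str, str] = {}
--     next_emotion_id = 1
--
--     for word, category in emotions.items():
--         # Assign variable name for this emotion
--         alias = f"e{next_emotion_id}"
--         next_emotion_id += 1
--         emotion_alias_map[word] = alias
--         # Escape properties
--         escaped_word = word.replace("'", "''")
--         escaped_category = str(category).replace("'", "''")
--         emotion_nodes.append(
--             f"CREATE ({alias}:Emotion {{word: '{escaped_word}', category: '{escaped_category}'}});"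
--         )
--     # For each sentence, check if it contains any emotion keyword
--     for s_idx, sentence in enumerate(sentences, start=1):
--         for word, alias in emotion_alias_map.items():
--             if word in sentence:
--                 # Relationship from sentence to emotion
--                 rels.append(f"CREATE (s{s_idx})-[:HAS_EMOTION]->({alias});")
--                 # For each character that appears in this sentence, create FEELS relationship
--                 for name, char_alias in char_var_map.items():
--                     if name in sentence:
--                         rels.append(f"CREATE ({char_alias})-[:FEELS]->({alias});")
--     return emotion_nodes, rels
-- ===== SOURCE B (Python) =====
-- from typing import List, Tuple, Dict
--
-- def generate_emotion_statements(
--     sentences: List[str],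
--     emotions: Dict[str, str],
--     char_var_map: Dict[str, str],
-- ) -> Tuple[List[str], List[str]]:
--     # Different algorithm: instead of A's direct nested scan that appends
--     # statements while testing, B first builds an inverted index emotion-major
--     # (per-sentence buckets of matching emotion ids) and a per-sentence FEELS
--     # target list, then emits all relationships in one test-free flattening pass.
--     def esc(s: str) -> str:
--         return s.replace("'", "''")
--
--     items = list(emotions.items())
--     emotion_nodes = [
--         f"CREATE (e{i}:Emotion {{word: '{esc(w)}', category: '{esc(c)}'}});"
--         for i, (w, c) in enumerate(items, start=1)
--     ]
--     buckets: List[List[int]] = [[] for _ in sentences]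
--     for i, (w, _) in enumerate(items, start=1):
--         buckets = [b + [i] if w in s else b for s, b in zip(sentences, buckets)]
--     feels = [[ca for name, ca in char_var_map.items() if name in s] for s in sentences]
--     rels = [stmt
--             for s_idx, (bk, fl) in enumerate(zip(buckets, feels), start=1)
--             for i in bk
--             for stmt in ([f"CREATE (s{s_idx})-[:HAS_EMOTION]->(e{i});"]
--                          + [f"CREATE ({ca})-[:FEELS]->(e{i});" for ca in fl])]
--     return emotion_nodes, rels
-- ===== Notes on version B (the rewrite author's own statement) =====
-- stated objective: alternative
-- what changed: B replaces A's direct nested append-while-testing scan by a staged inverted index: an emotion-major pass fills per-sentence buckets of matching emotion ids, a separate pass computes per-sentence FEELS target lists, and the relationships are then emitted by a single test-free flattening of those indexes.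
import Mathlib
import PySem

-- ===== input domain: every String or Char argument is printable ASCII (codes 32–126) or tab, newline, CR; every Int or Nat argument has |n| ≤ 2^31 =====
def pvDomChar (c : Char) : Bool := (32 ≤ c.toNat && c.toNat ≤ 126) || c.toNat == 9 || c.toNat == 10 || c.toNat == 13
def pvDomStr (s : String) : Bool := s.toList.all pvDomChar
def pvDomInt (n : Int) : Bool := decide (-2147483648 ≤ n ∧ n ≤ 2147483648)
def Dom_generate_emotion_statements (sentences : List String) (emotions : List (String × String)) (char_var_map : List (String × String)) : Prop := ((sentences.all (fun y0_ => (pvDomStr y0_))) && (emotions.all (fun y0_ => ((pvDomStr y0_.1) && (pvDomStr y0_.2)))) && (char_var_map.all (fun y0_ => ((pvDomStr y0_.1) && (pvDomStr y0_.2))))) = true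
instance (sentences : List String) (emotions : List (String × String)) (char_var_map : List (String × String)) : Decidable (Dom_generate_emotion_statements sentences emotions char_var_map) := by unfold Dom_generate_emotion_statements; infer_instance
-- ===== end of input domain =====

-- B builds a staged inverted index (per-sentence buckets of matching emotion ids,
-- per-sentence FEELS lists) and emits by a test-free flattening; same return value (alternative).

-- ===== PORT A =====
-- word.replace("'", "''")
def pvEsc (s : String) : String := PySem.Str.replace s "'" "''"

def generate_emotion_statements (sentences : List String) (emotions : List (String × String)) (char_var_map : List (String × String)) : List String × List String :=
  -- the dict parameters: insertion-order dicts built from the association lists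
  let emotionsD := PySem.Dict.ofList emotions
  let charD := PySem.Dict.ofList char_var_map
  -- first loop: emotion_nodes, emotion_alias_map, next_emotion_id
  let st := emotionsD.items.foldl (fun (st : List String × PySem.Dict String String × Int) p =>
      let al := "e" ++ PySem.Int.toStr st.2.2
      (st.1 ++ ["CREATE (" ++ al ++ ":Emotion {word: '" ++ pvEsc p.1 ++ "', category: '" ++ pvEsc p.2 ++ "'});"],
       st.2.1.insert p.1 al, st.2.2 + 1))
    (([] : List String), (PySem.Dict.empty : PySem.Dict String String), (1 : Int))
  -- second loop: for s_idx, sentence in enumerate(sentences, 1): for word, al in emotion_alias_map.items(): …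
  let rels := (PySem.List.enumerate sentences 1).foldl (fun rels q =>
      st.2.1.items.foldl (fun rels wa =>
        if PySem.Str.isIn wa.1 q.2 then
          charD.items.foldl (fun rels nc =>
            if PySem.Str.isIn nc.1 q.2 then rels ++ ["CREATE (" ++ nc.2 ++ ")-[:FEELS]->(" ++ wa.2 ++ ");"] else rels)
            (rels ++ ["CREATE (s" ++ PySem.Int.toStr q.1 ++ ")-[:HAS_EMOTION]->(" ++ wa.2 ++ ");"])
        else rels) rels) ([] : List String)
  (st.1, rels)

-- ===== PORT B =====
def generate_emotion_statements_alt (sentences : List String) (emotions : List (String × String)) (char_var_map : List (String × String)) : List String × List String :=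
  let items := (PySem.Dict.ofList emotions).items
  let emotion_nodes := (PySem.List.enumerate items 1).map (fun p =>
      "CREATE (e" ++ PySem.Int.toStr p.1 ++ ":Emotion {word: '" ++ pvEsc p.2.1 ++ "', category: '" ++ pvEsc p.2.2 ++ "'});")
  -- buckets = [[] for _ in sentences]; emotion-major pass rebuilding the bucket list
  let buckets := (PySem.List.enumerate items 1).foldl (fun bks iw =>
      (sentences.zip bks).map (fun sb => if PySem.Str.isIn iw.2.1 sb.1 then sb.2 ++ [iw.1] else sb.2))
    (sentences.map (fun _ => ([] : List Int)))
  -- feels = per-sentence FEELS target list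
  let feels := sentences.map (fun s =>
      ((PySem.Dict.ofList char_var_map).items.filter (fun nc => PySem.Str.isIn nc.1 s)).map (fun nc => nc.2))
  -- one test-free flattening pass
  let rels := (PySem.List.enumerate (buckets.zip feels) 1).flatMap (fun q =>
      q.2.1.flatMap (fun i =>
        ["CREATE (s" ++ PySem.Int.toStr q.1 ++ ")-[:HAS_EMOTION]->(e" ++ PySem.Int.toStr i ++ ");"] ++
          q.2.2.map (fun ca => "CREATE (" ++ ca ++ ")-[:FEELS]->(e" ++ PySem.Int.toStr i ++ ");")))
  (emotion_nodes, rels)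

-- ===== PRECONDITION & SPEC =====
def Spec_generate_emotion_statements (sentences : List String) (emotions : List (String × String)) (char_var_map : List (String × String)) (out : List String × List String) : Prop := out = generate_emotion_statements_alt sentences emotions char_var_map
instance (sentences : List String) (emotions : List (String × String)) (char_var_map : List (String × String)) (out : List String × List String) : Decidable (Spec_generate_emotion_statements sentences emotions char_var_map out) := by unfold Spec_generate_emotion_statements; infer_instance

-- ===== CLAIM (what is proved, stated in full; the proofs are below) =====
def Claim_equal_generate_emotion_statements : Prop := ∀ (sentences : List String) (emotions : List (String × String)) (char_var_map : List (String × String)), Dom_generate_emotion_statements sentences emotions char_var_map → Spec_generate_emotion_statements sentences emotions char_var_map (generate_emotion_statements sentences emotions char_var_map)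

-- ===== LEMMAS AND PROOFS =====

-- merge a string literal through right-associated append
theorem pvAppLit (a b c t : String) (h : a ++ b = c) : a ++ (b ++ t) = c ++ t := by
  rw [← String.append_assoc, h]

-- A's first loop, characterised: nodes append the enumerated node strings and the
-- alias dict's items append (word, "e<i>") pairs, keys being fresh and distinct.
theorem foldA_spec (l : List (String × String)) (nodes : List String)
    (d : PySem.Dict String String) (n : Int)
    (hfresh : ∀ p ∈ l, d.contains p.1 = false) (hnd : (l.map Prod.fst).Nodup) :
    (l.foldl (fun (st : List String × PySem.Dict String String × Int) p =>
      let al := "e" ++ PySem.Int.toStr st.2.2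
      (st.1 ++ ["CREATE (" ++ al ++ ":Emotion {word: '" ++ pvEsc p.1 ++ "', category: '" ++ pvEsc p.2 ++ "'});"],
       st.2.1.insert p.1 al, st.2.2 + 1)) (nodes, d, n)).1
      = nodes ++ (PySem.List.enumerate l n).map (fun q =>
          "CREATE (" ++ ("e" ++ PySem.Int.toStr q.1) ++ ":Emotion {word: '" ++ pvEsc q.2.1 ++ "', category: '" ++ pvEsc q.2.2 ++ "'});")
    ∧ (l.foldl (fun (st : List String × PySem.Dict String String × Int) p =>
      let al := "e" ++ PySem.Int.toStr st.2.2
      (st.1 ++ ["CREATE (" ++ al ++ ":Emotion {word: '" ++ pvEsc p.1 ++ "', category: '" ++ pvEsc p.2 ++ "'});"],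
       st.2.1.insert p.1 al, st.2.2 + 1)) (nodes, d, n)).2.1.items
      = d.items ++ (PySem.List.enumerate l n).map (fun q => (q.2.1, "e" ++ PySem.Int.toStr q.1)) := by
  induction l generalizing nodes d n with
  | nil => simp [PySem.List.enumerate_nil]
  | cons p t ih =>
    have hp : d.contains p.1 = false := hfresh p (List.mem_cons_self ..)
    have hfresh' : ∀ q ∈ t, (d.insert p.1 ("e" ++ PySem.Int.toStr n)).contains q.1 = false := by
      intro q hq
      rw [PySem.Dict.contains_insert]
      have hne : q.1 ≠ p.1 := by
        simp only [List.map_cons, List.nodup_cons] at hnd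
        intro h; exact hnd.1 (h ▸ List.mem_map_of_mem hq)
      simp [hne, hfresh q (List.mem_cons_of_mem _ hq)]
    have hnd' : (t.map Prod.fst).Nodup := by
      simp only [List.map_cons, List.nodup_cons] at hnd; exact hnd.2
    obtain ⟨h1, h2⟩ := ih
      (nodes ++ ["CREATE (" ++ ("e" ++ PySem.Int.toStr n) ++ ":Emotion {word: '" ++ pvEsc p.1 ++ "', category: '" ++ pvEsc p.2 ++ "'});"])
      (d.insert p.1 ("e" ++ PySem.Int.toStr n)) (n + 1) hfresh' hnd'
    rw [PySem.List.enumerate_cons]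
    refine ⟨?_, ?_⟩
    · rw [List.foldl_cons]; rw [h1]; simp
    · rw [List.foldl_cons]; rw [h2, PySem.Dict.items_insert_of_not_contains _ _ hp]; simp

-- B's bucket loop, characterised: starting from per-sentence accumulators g s, the
-- emotion-major pass appends to each sentence's bucket the ids of the emotions it contains.
theorem foldB_buckets (l : List (Int × (String × String))) (sentences : List String)
    (g : String → List Int) :
    l.foldl (fun bks iw =>
        (sentences.zip bks).map (fun sb => if PySem.Str.isIn iw.2.1 sb.1 then sb.2 ++ [iw.1] else sb.2))
      (sentences.map g)
    = sentences.map (fun s => g s ++ (l.filter (fun iw => PySem.Str.isIn iw.2.1 s)).map Prod.fst) := by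
  induction l generalizing g with
  | nil => simp
  | cons iw t ih =>
    rw [List.foldl_cons]
    have hz : (sentences.zip (sentences.map g)).map
        (fun sb => if PySem.Str.isIn iw.2.1 sb.1 then sb.2 ++ [iw.1] else sb.2)
        = sentences.map (fun s => if PySem.Str.isIn iw.2.1 s then g s ++ [iw.1] else g s) := by
      have h := @List.zip_map' String String (List Int) id g sentences
      simp only [List.map_id] at h
      rw [h, List.map_map]; rfl
    rw [hz, ih (fun s => if PySem.Str.isIn iw.2.1 s then g s ++ [iw.1] else g s)]
    apply List.map_congr_left
    intro s _
    by_cases h : PySem.Chars.isIn iw.2.1.toList s.toList = true <;>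
      simp [h, PySem.Str.isIn]

-- flatMap over a filtered list = flatMap with an if over the whole list
theorem flatMap_filter_eq_flatMap_if {α β : Type} (p : α → Bool) (g : α → List β) (l : List α) :
    (l.filter p).flatMap g = l.flatMap (fun x => if p x then g x else []) := by
  induction l with
  | nil => rfl
  | cons x t ih =>
    by_cases h : p x = true <;> simp [h, ih]

-- enumerate of a mapped list
theorem enumerate_map {α β : Type} (f : α → β) (l : List α) (n : Int) :
    PySem.List.enumerate (l.map f) n = (PySem.List.enumerate l n).map (fun p => (p.1, f p.2)) := by
  induction l generalizing n with
  | nil => simp [PySem.List.enumerate_nil]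
  | cons x t ih => simp [PySem.List.enumerate_cons, ih]


-- A's sentence loop, characterised as a flatMap of per-sentence blocks
-- (hasS : the HAS_EMOTION statement, feelsS : the FEELS statement)
theorem foldA_rels {α β : Type} (sents : List (α × String)) (aliases : List (β × String))
    (chars : List (String × String)) (rels0 : List String)
    (hasS : α → String → String) (feelsS : String → String → String)
    (key : β → String) :
    sents.foldl (fun rels q =>
      aliases.foldl (fun rels wa =>
        if PySem.Str.isIn (key wa.1) q.2 then
          chars.foldl (fun rels nc =>
            if PySem.Str.isIn nc.1 q.2 then rels ++ [feelsS nc.2 wa.2] else rels)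
            (rels ++ [hasS q.1 wa.2])
        else rels) rels) rels0
    = rels0 ++ sents.flatMap (fun q =>
        aliases.flatMap (fun wa =>
          if PySem.Str.isIn (key wa.1) q.2 then
            hasS q.1 wa.2 :: (chars.filter (fun nc => PySem.Str.isIn nc.1 q.2)).map (fun nc => feelsS nc.2 wa.2)
          else [])) := by
  have hinner : ∀ (q : α × String) (rels : List String),
      aliases.foldl (fun rels wa =>
        if PySem.Str.isIn (key wa.1) q.2 then
          chars.foldl (fun rels nc =>
            if PySem.Str.isIn nc.1 q.2 then rels ++ [feelsS nc.2 wa.2] else rels)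
            (rels ++ [hasS q.1 wa.2])
        else rels) rels
      = rels ++ aliases.flatMap (fun wa =>
          if PySem.Str.isIn (key wa.1) q.2 then
            hasS q.1 wa.2 :: (chars.filter (fun nc => PySem.Str.isIn nc.1 q.2)).map (fun nc => feelsS nc.2 wa.2)
          else []) := by
    intro q rels
    rw [PySem.List.foldl_congr_mem (g := fun rels wa => rels ++
        (if PySem.Str.isIn (key wa.1) q.2 then
          hasS q.1 wa.2 :: (chars.filter (fun nc => PySem.Str.isIn nc.1 q.2)).map (fun nc => feelsS nc.2 wa.2)
         else []))]
    · exact PySem.List.foldl_append_eq_flatMap _ _ _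
    · intro acc wa _
      by_cases h : PySem.Str.isIn (key wa.1) q.2 = true
      · simp only [if_pos h]
        rw [PySem.List.foldl_append_if (fun nc : String × String => PySem.Str.isIn nc.1 q.2)
          (fun nc : String × String => feelsS nc.2 wa.2)]
        simp
      · simp only [if_neg h, List.append_nil]
  rw [PySem.List.foldl_congr_mem (g := fun rels q => rels ++
      aliases.flatMap (fun wa =>
        if PySem.Str.isIn (key wa.1) q.2 then
          hasS q.1 wa.2 :: (chars.filter (fun nc => PySem.Str.isIn nc.1 q.2)).map (fun nc => feelsS nc.2 wa.2)
        else []))]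
  · exact PySem.List.foldl_append_eq_flatMap _ _ _
  · intro acc q _; exact hinner q acc

theorem generate_emotion_statements_spec : Claim_equal_generate_emotion_statements := by
  intro sentences emotions char_var_map _
  unfold Spec_generate_emotion_statements generate_emotion_statements generate_emotion_statements_alt
  dsimp only
  have hA : ∀ t, "CREATE (" ++ ("e" ++ t) = "CREATE (e" ++ t := fun t => pvAppLit _ _ _ t rfl
  have hH : ∀ t, ")-[:HAS_EMOTION]->(" ++ ("e" ++ t) = ")-[:HAS_EMOTION]->(e" ++ t := fun t => pvAppLit _ _ _ t rfl
  have hF : ∀ t, ")-[:FEELS]->(" ++ ("e" ++ t) = ")-[:FEELS]->(e" ++ t := fun t => pvAppLit _ _ _ t rfl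
  have hnd : ((PySem.Dict.ofList emotions).items.map Prod.fst).Nodup :=
    PySem.Dict.nodup_keys_ofList emotions
  obtain ⟨h1, h2⟩ := foldA_spec (PySem.Dict.ofList emotions).items [] PySem.Dict.empty 1
    (by intro p _; exact PySem.Dict.contains_empty _) hnd
  refine Prod.ext ?_ ?_
  · rw [h1, List.nil_append]
    apply List.map_congr_left
    intro q _
    simp [String.append_assoc, hA]
  · -- the relationships
    rw [h2, show (PySem.Dict.empty : PySem.Dict String String).items = [] from rfl, List.nil_append]
    rw [foldA_rels (PySem.List.enumerate sentences 1)
        ((PySem.List.enumerate (PySem.Dict.ofList emotions).items 1).map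
          (fun r => (r.2.1, "e" ++ PySem.Int.toStr r.1)))
        (PySem.Dict.ofList char_var_map).items []
        (fun i al => "CREATE (s" ++ PySem.Int.toStr i ++ ")-[:HAS_EMOTION]->(" ++ al ++ ");")
        (fun ca al => "CREATE (" ++ ca ++ ")-[:FEELS]->(" ++ al ++ ");")
        (fun w => w), List.nil_append]
    -- B side: normalise buckets, the zip of the two maps, and the enumerate of a map
    rw [foldB_buckets (PySem.List.enumerate (PySem.Dict.ofList emotions).items 1) sentences
        (fun _ => ([] : List Int))]
    simp only [List.nil_append]
    rw [@List.zip_map' String (List Int) (List String)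
        (fun s => ((PySem.List.enumerate (PySem.Dict.ofList emotions).items 1).filter
          (fun iw => PySem.Str.isIn iw.2.1 s)).map Prod.fst)
        (fun s => (((PySem.Dict.ofList char_var_map).items.filter
          (fun nc => PySem.Str.isIn nc.1 s)).map (fun nc => nc.2))) sentences]
    rw [enumerate_map]
    rw [List.flatMap_map]
    apply List.flatMap_congr  -- pointwise equality of the per-sentence blocks
    intro q _
    dsimp only
    simp only [List.flatMap_map]
    rw [flatMap_filter_eq_flatMap_if]
    apply List.flatMap_congr
    intro iw _
    dsimp only
    by_cases h : PySem.Str.isIn iw.2.1 q.2 = true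
    · simp only [if_pos h]
      simp [String.append_assoc, hH, hF]
    · simp only [if_neg h]

-- ===== VERDICT (by name: the statement is the Claim_ definition above) =====
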